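-- pv_equiv track=rewrite | github.com/ew6o6/mad | mad/transformers/network.py | _extract_identity_info
-- ===== SOURCE A (Python) =====
-- from typing import Union, Optional, Dict, Any, List
--
-- def _extract_identity_info(data: Dict) -> Dict:
--     """Extract user/bot identification info"""
--     identity = {}
--     # Extract common fields
--     for key in ["id", "user_id", "bot_id", "account_id"]:
--         if key in data:
--             identity["id"] = data[key]
--             break
--     for key in ["name", "username", "display_name", "bot_name"]:
--         if key in data:
--             identity["name"] = data[key]
--             break
--     for key in ["email", "email_address"]:
--         if key in data:
--             identity["email"] = data[key]
--             break
--     for key in ["avatar", "avatar_url", "profile_image"]: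
--         if key in data:
--             identity["avatar"] = data[key]
--             break
--     if "object" in data:
--         identity["type"] = data["object"]
--     return identity
-- ===== SOURCE B (Python) =====
-- def _extract_identity_info(data):
--     """Extract user/bot identification info"""
--     # Reverse index: source key -> (output field, priority rank).
--     rank = {"id": ("id", 0), "user_id": ("id", 1), "bot_id": ("id", 2), "account_id": ("id", 3),
--             "name": ("name", 0), "username": ("name", 1), "display_name": ("name", 2), "bot_name": ("name", 3),
--             "email": ("email", 0), "email_address": ("email", 1),
--             "avatar": ("avatar", 0), "avatar_url": ("avatar", 1), "profile_image": ("avatar", 2),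
--             "object": ("type", 0)}
--     # One pass over the data, keeping for each field the value of the lowest-rank key seen.
--     best = {}
--     for key, value in data.items():
--         hit = rank.get(key)
--         if hit is not None:
--             field, r = hit
--             cur = best.get(field)
--             if cur is None or r < cur[0]:
--                 best[field] = (r, value)
--     identity = {}
--     for field in ("id", "name", "email", "avatar", "type"):
--         if field in best:
--             identity[field] = best[field][1]
--     return identity
-- ===== Notes on version B (the rewrite author's own statement) =====
-- stated objective: alternative
-- what changed: Inverts the traversal: instead of scanning four candidate-key lists against the dict (first hit breaks), B makes one pass over the data items with a reverse index key->(field, rank) and keeps, per output field, the value of the lowest-rank key seen, then emits the fields in fixed order.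
import Mathlib
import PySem

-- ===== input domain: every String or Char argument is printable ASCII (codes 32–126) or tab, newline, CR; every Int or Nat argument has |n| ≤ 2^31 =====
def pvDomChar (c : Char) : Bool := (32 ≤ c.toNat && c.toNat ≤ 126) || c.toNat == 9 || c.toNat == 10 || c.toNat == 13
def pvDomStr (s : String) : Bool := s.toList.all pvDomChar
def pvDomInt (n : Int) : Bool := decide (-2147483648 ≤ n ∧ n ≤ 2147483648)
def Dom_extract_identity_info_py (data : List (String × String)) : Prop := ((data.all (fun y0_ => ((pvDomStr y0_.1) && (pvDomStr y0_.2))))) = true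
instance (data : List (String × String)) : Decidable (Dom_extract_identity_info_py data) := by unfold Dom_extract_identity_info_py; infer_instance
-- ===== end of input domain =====

-- B inverts A's four per-field candidate scans into ONE pass over the data itself, using a
-- reverse index key → (field, rank) and keeping the lowest-rank value per field (alternative decomposition, same cost).

-- ===== PORT A =====
-- 'for key in keys: if key in data: identity[field] = data[key]; break'
def aScan (d : PySem.Dict String String) (identity : PySem.Dict String String)
    (field : String) : List String → PySem.Dict String String
  | [] => identity
  | k :: ks =>
    if d.contains k then identity.insert field (d.getD k "")
    else aScan d identity field ks

def extract_identity_info_py (data : List (String × String)) : List (String × String) :=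
  let d := PySem.Dict.ofList data
  let identity : PySem.Dict String String := PySem.Dict.empty
  let identity := aScan d identity "id" ["id", "user_id", "bot_id", "account_id"]
  let identity := aScan d identity "name" ["name", "username", "display_name", "bot_name"]
  let identity := aScan d identity "email" ["email", "email_address"]
  let identity := aScan d identity "avatar" ["avatar", "avatar_url", "profile_image"]
  let identity := if d.contains "object" then identity.insert "type" (d.getD "object" "") else identity
  identity.items

-- ===== PORT B =====
-- the dict literal 'rank' of Source B: source key → (output field, priority rank)
def bRank : PySem.Dict String (String × Int) :=
  PySem.Dict.mk [("id", ("id", 0)), ("user_id", ("id", 1)), ("bot_id", ("id", 2)), ("account_id", ("id", 3)),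
    ("name", ("name", 0)), ("username", ("name", 1)), ("display_name", ("name", 2)), ("bot_name", ("name", 3)),
    ("email", ("email", 0)), ("email_address", ("email", 1)),
    ("avatar", ("avatar", 0)), ("avatar_url", ("avatar", 1)), ("profile_image", ("avatar", 2)),
    ("object", ("type", 0))]

-- loop body of Source B's single pass over data.items()
def bStep (best : PySem.Dict String (Int × String)) (kv : String × String) :
    PySem.Dict String (Int × String) :=
  match bRank.get? kv.1 with
  | some hit =>
    match best.get? hit.1 with
    | none => best.insert hit.1 (hit.2, kv.2)
    | some cur => if hit.2 < cur.1 then best.insert hit.1 (hit.2, kv.2) else best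
  | none => best

def extract_identity_info_py_alt (data : List (String × String)) : List (String × String) :=
  let d := PySem.Dict.ofList data
  let best := d.items.foldl bStep PySem.Dict.empty
  (["id", "name", "email", "avatar", "type"].foldl (fun identity f =>
      match best.get? f with
      | some p => identity.insert f p.2
      | none => identity) PySem.Dict.empty).items

-- ===== PRECONDITION & SPEC =====
def Spec_extract_identity_info_py (data : List (String × String)) (out : List (String × String)) : Prop := out = extract_identity_info_py_alt data
instance (data : List (String × String)) (out : List (String × String)) : Decidable (Spec_extract_identity_info_py data out) := by unfold Spec_extract_identity_info_py; infer_instance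

-- ===== CLAIM (what is proved, stated in full; the proofs are below) =====
def Claim_equal_extract_identity_info_py : Prop := ∀ (data : List (String × String)), Dom_extract_identity_info_py data → Spec_extract_identity_info_py data (extract_identity_info_py data)

-- ===== LEMMAS AND PROOFS =====

-- first-match lookup in a plain association list (what d.get? computes on d.items)
def lk : List (String × String) → String → Option String
  | [], _ => none
  | (a, v) :: l, k => if a == k then some v else lk l k

theorem dict_get?_lk (l : List (String × String)) (k : String) :
    (PySem.Dict.mk l).get? k = lk l k := by
  induction l with
  | nil => rfl
  | cons p l ih => cases p; simp [PySem.Dict.get?_mk_cons, lk, ih]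

-- the (rank, value) contribution of a single data item for a candidate list, ranks from n
def hitAux (n : Int) : List String → (String × String) → Option (Int × String)
  | [], _ => none
  | k :: ks, kv => if k == kv.1 then some (n, kv.2) else hitAux (n + 1) ks kv

-- keep the strictly smaller rank; ties and a missing right side keep the left (earlier) one
def mrg : Option (Int × String) → Option (Int × String) → Option (Int × String)
  | acc, none => acc
  | none, some p => some p
  | some cur, some p => if p.1 < cur.1 then some p else some cur

-- the first candidate (rank from n) present in the association list, with its value
def selAux (n : Int) : List String → List (String × String) → Option (Int × String)
  | [], _ => none
  | k :: ks, l =>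
    match lk l k with
    | some v => some (n, v)
    | none => selAux (n + 1) ks l

theorem hitAux_lb (ks : List String) (kv : String × String) :
    ∀ n q, hitAux n ks kv = some q → n ≤ q.1 := by
  induction ks with
  | nil => intro n q h; exact absurd h (by simp [hitAux])
  | cons k ks ih =>
    intro n q h
    simp only [hitAux] at h
    by_cases hk : (k == kv.1) = true
    · rw [if_pos hk] at h; cases h; exact le_rfl
    · rw [if_neg hk] at h; have := ih (n + 1) q h; omega

theorem selAux_lb (ks : List String) (l : List (String × String)) :
    ∀ n q, selAux n ks l = some q → n ≤ q.1 := by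
  induction ks with
  | nil => intro n q h; exact absurd h (by simp [selAux])
  | cons k ks ih =>
    intro n q h
    simp only [selAux] at h
    cases hl : lk l k with
    | some v => simp only [hl] at h; cases h; exact le_rfl
    | none => simp only [hl] at h; have := ih (n + 1) q h; omega

theorem mrg_none_left (b : Option (Int × String)) : mrg none b = b := by
  cases b <;> rfl

theorem mrg_none_right (a : Option (Int × String)) : mrg a none = a := by
  cases a <;> rfl

theorem mrg_some_some (a b : Int × String) :
    mrg (some a) (some b) = if b.1 < a.1 then some b else some a := rfl

theorem mrg_some_left (p : Int × String) (b : Option (Int × String))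
    (h : ∀ q, b = some q → p.1 ≤ q.1) : mrg (some p) b = some p := by
  cases b with
  | none => rfl
  | some q => have := h q rfl; rw [mrg_some_some, if_neg (by omega)]

theorem mrg_some_right (a : Option (Int × String)) (p : Int × String)
    (h : ∀ q, a = some q → p.1 < q.1) : mrg a (some p) = some p := by
  cases a with
  | none => rfl
  | some q => have := h q rfl; rw [mrg_some_some, if_pos this]

theorem mrg_assoc (a b c : Option (Int × String)) :
    mrg (mrg a b) c = mrg a (mrg b c) := by
  rcases a with _ | a
  · rw [mrg_none_left, mrg_none_left]
  rcases c with _ | c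
  · rw [mrg_none_right, mrg_none_right]
  rcases b with _ | b
  · rw [mrg_none_right, mrg_none_left]
  · by_cases h1 : b.1 < a.1 <;> by_cases h2 : c.1 < b.1 <;>
      rw [mrg_some_some a b, mrg_some_some b c]
    · rw [if_pos h1, if_pos h2, mrg_some_some, mrg_some_some, if_pos h2,
        if_pos (show c.1 < a.1 by omega)]
    · rw [if_pos h1, if_neg h2, mrg_some_some, mrg_some_some, if_neg h2, if_pos h1]
    · rw [if_neg h1, if_pos h2]
    · rw [if_neg h1, if_neg h2, mrg_some_some, mrg_some_some,
        if_neg (show ¬ c.1 < a.1 by omega), if_neg h1]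

theorem selAux_nil (n : Int) (ks : List String) : selAux n ks [] = none := by
  induction ks generalizing n with
  | nil => rfl
  | cons k ks ih => simp [selAux, lk, ih]

theorem selAux_cons (ks : List String) (x : String × String) (l : List (String × String)) :
    ∀ n, selAux n ks (x :: l) = mrg (hitAux n ks x) (selAux n ks l) := by
  obtain ⟨xk, xv⟩ := x
  induction ks with
  | nil => intro n; rfl
  | cons k ks ih =>
    intro n
    by_cases hx : xk = k
    · subst hx
      simp only [selAux, lk, hitAux, beq_self_eq_true, if_true]
      refine (mrg_some_left _ _ ?_).symm
      intro q hq
      cases hl : lk l xk with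
      | some v =>
        rw [hl] at hq
        have hq' : (n, v) = q := Option.some.inj (show some ((n : Int), v) = some q from hq)
        rw [← hq']
      | none =>
        rw [hl] at hq
        have := selAux_lb ks l (n + 1) q (show selAux (n + 1) ks l = some q from hq)
        show (n : Int) ≤ q.1
        omega
    · have hx1 : (xk == k) = false := by simp [hx]
      have hx2 : (k == xk) = false := by simp [Ne.symm hx]
      simp only [selAux, lk, hitAux, hx1, hx2, Bool.false_eq_true, if_false]
      cases hl : lk l k with
      | some v =>
        simp only [hl]
        refine (mrg_some_right _ _ ?_).symm
        intro q hq
        have := hitAux_lb ks (xk, xv) (n + 1) q hq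
        show (n : Int) < q.1
        omega
      | none =>
        simp only [hl]
        exact ih (n + 1)

theorem foldl_mrg (f : String × String → Option (Int × String)) (l : List (String × String)) :
    ∀ acc, l.foldl (fun a kv => mrg a (f kv)) acc =
      mrg acc (l.foldl (fun a kv => mrg a (f kv)) none) := by
  induction l with
  | nil => intro acc; simp [mrg_none_right]
  | cons x l ih =>
    intro acc
    simp only [List.foldl_cons]
    rw [ih (mrg acc (f x)), ih (mrg none (f x)), mrg_none_left, mrg_assoc]

theorem fold_eq_sel (ks : List String) (l : List (String × String)) :
    l.foldl (fun a kv => mrg a (hitAux 0 ks kv)) none = selAux 0 ks l := by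
  induction l with
  | nil => exact (selAux_nil 0 ks).symm
  | cons x l ih =>
    simp only [List.foldl_cons]
    rw [foldl_mrg, mrg_none_left, ih, selAux_cons]

-- projection of Source B's main loop onto one output field
def pstep (f : String) (acc : Option (Int × String)) (kv : String × String) :
    Option (Int × String) :=
  match bRank.get? kv.1 with
  | some hit =>
    if hit.1 = f then
      match acc with
      | none => some (hit.2, kv.2)
      | some cur => if hit.2 < cur.1 then some (hit.2, kv.2) else some cur
    else acc
  | none => acc

theorem bStep_get? (f : String) (best : PySem.Dict String (Int × String)) (kv : String × String) :
    (bStep best kv).get? f = pstep f (best.get? f) kv := by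
  unfold bStep pstep
  cases hr : bRank.get? kv.1 with
  | none => rfl
  | some hit =>
    cases hb : best.get? hit.1 with
    | none =>
      by_cases hgf : hit.1 = f
      · subst hgf; simp [hb, PySem.Dict.get?_insert]
      · simp [hb, PySem.Dict.get?_insert, hgf, Ne.symm hgf]
    | some cur =>
      by_cases hgf : hit.1 = f
      · subst hgf
        by_cases hlt : hit.2 < cur.1 <;> simp [hb, hlt, PySem.Dict.get?_insert]
      · by_cases hlt : hit.2 < cur.1 <;>
          simp [hb, hlt, PySem.Dict.get?_insert, hgf, Ne.symm hgf]

theorem proj (f : String) (l : List (String × String)) :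
    ∀ best : PySem.Dict String (Int × String),
      (l.foldl bStep best).get? f = l.foldl (pstep f) (best.get? f) := by
  induction l with
  | nil => intro best; rfl
  | cons kv l ih =>
    intro best
    simp only [List.foldl_cons]
    rw [ih, bStep_get?]

-- bRank.get? written out as a first-match chain over the 14 table keys
theorem bRank_get? (k : String) : bRank.get? k =
    (if "id" == k then some (("id", 0) : String × Int) else
     if "user_id" == k then some ("id", 1) else
     if "bot_id" == k then some ("id", 2) else
     if "account_id" == k then some ("id", 3) else
     if "name" == k then some ("name", 0) else
     if "username" == k then some ("name", 1) else
     if "display_name" == k then some ("name", 2) else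
     if "bot_name" == k then some ("name", 3) else
     if "email" == k then some ("email", 0) else
     if "email_address" == k then some ("email", 1) else
     if "avatar" == k then some ("avatar", 0) else
     if "avatar_url" == k then some ("avatar", 1) else
     if "profile_image" == k then some ("avatar", 2) else
     if "object" == k then some ("type", 0) else none) := by
  simp only [bRank, PySem.Dict.get?_mk_cons]
  rfl

set_option maxHeartbeats 1000000 in
theorem pstep_eq_id (acc : Option (Int × String)) (kv : String × String) :
    pstep "id" acc kv = mrg acc (hitAux 0 ["id", "user_id", "bot_id", "account_id"] kv) := by
  obtain ⟨k, v⟩ := kv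
  by_cases h1 : k = "id"
  · subst h1; rcases acc with _ | cur <;> rfl
  by_cases h2 : k = "user_id"
  · subst h2; rcases acc with _ | cur <;> rfl
  by_cases h3 : k = "bot_id"
  · subst h3; rcases acc with _ | cur <;> rfl
  by_cases h4 : k = "account_id"
  · subst h4; rcases acc with _ | cur <;> rfl
  by_cases h5 : k = "name"
  · subst h5; rcases acc with _ | cur <;> rfl
  by_cases h6 : k = "username"
  · subst h6; rcases acc with _ | cur <;> rfl
  by_cases h7 : k = "display_name"
  · subst h7; rcases acc with _ | cur <;> rfl
  by_cases h8 : k = "bot_name"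
  · subst h8; rcases acc with _ | cur <;> rfl
  by_cases h9 : k = "email"
  · subst h9; rcases acc with _ | cur <;> rfl
  by_cases h10 : k = "email_address"
  · subst h10; rcases acc with _ | cur <;> rfl
  by_cases h11 : k = "avatar"
  · subst h11; rcases acc with _ | cur <;> rfl
  by_cases h12 : k = "avatar_url"
  · subst h12; rcases acc with _ | cur <;> rfl
  by_cases h13 : k = "profile_image"
  · subst h13; rcases acc with _ | cur <;> rfl
  by_cases h14 : k = "object"
  · subst h14; rcases acc with _ | cur <;> rfl
  · have hr : bRank.get? k = none := by
      rw [bRank_get? k]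
      simp [Ne.symm h1, Ne.symm h2, Ne.symm h3, Ne.symm h4, Ne.symm h5, Ne.symm h6, Ne.symm h7,
        Ne.symm h8, Ne.symm h9, Ne.symm h10, Ne.symm h11, Ne.symm h12, Ne.symm h13, Ne.symm h14]
    have hh : hitAux 0 ["id", "user_id", "bot_id", "account_id"] (k, v) = none := by
      simp [hitAux, Ne.symm h1, Ne.symm h2, Ne.symm h3, Ne.symm h4]
    rcases acc with _ | cur <;> simp [pstep, hr, hh, mrg]

set_option maxHeartbeats 1000000 in
theorem pstep_eq_name (acc : Option (Int × String)) (kv : String × String) :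
    pstep "name" acc kv = mrg acc (hitAux 0 ["name", "username", "display_name", "bot_name"] kv) := by
  obtain ⟨k, v⟩ := kv
  by_cases h1 : k = "id"
  · subst h1; rcases acc with _ | cur <;> rfl
  by_cases h2 : k = "user_id"
  · subst h2; rcases acc with _ | cur <;> rfl
  by_cases h3 : k = "bot_id"
  · subst h3; rcases acc with _ | cur <;> rfl
  by_cases h4 : k = "account_id"
  · subst h4; rcases acc with _ | cur <;> rfl
  by_cases h5 : k = "name"
  · subst h5; rcases acc with _ | cur <;> rfl
  by_cases h6 : k = "username"
  · subst h6; rcases acc with _ | cur <;> rfl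
  by_cases h7 : k = "display_name"
  · subst h7; rcases acc with _ | cur <;> rfl
  by_cases h8 : k = "bot_name"
  · subst h8; rcases acc with _ | cur <;> rfl
  by_cases h9 : k = "email"
  · subst h9; rcases acc with _ | cur <;> rfl
  by_cases h10 : k = "email_address"
  · subst h10; rcases acc with _ | cur <;> rfl
  by_cases h11 : k = "avatar"
  · subst h11; rcases acc with _ | cur <;> rfl
  by_cases h12 : k = "avatar_url"
  · subst h12; rcases acc with _ | cur <;> rfl
  by_cases h13 : k = "profile_image"
  · subst h13; rcases acc with _ | cur <;> rfl
  by_cases h14 : k = "object"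
  · subst h14; rcases acc with _ | cur <;> rfl
  · have hr : bRank.get? k = none := by
      rw [bRank_get? k]
      simp [Ne.symm h1, Ne.symm h2, Ne.symm h3, Ne.symm h4, Ne.symm h5, Ne.symm h6, Ne.symm h7,
        Ne.symm h8, Ne.symm h9, Ne.symm h10, Ne.symm h11, Ne.symm h12, Ne.symm h13, Ne.symm h14]
    have hh : hitAux 0 ["name", "username", "display_name", "bot_name"] (k, v) = none := by
      simp [hitAux, Ne.symm h5, Ne.symm h6, Ne.symm h7, Ne.symm h8]
    rcases acc with _ | cur <;> simp [pstep, hr, hh, mrg]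

set_option maxHeartbeats 1000000 in
theorem pstep_eq_email (acc : Option (Int × String)) (kv : String × String) :
    pstep "email" acc kv = mrg acc (hitAux 0 ["email", "email_address"] kv) := by
  obtain ⟨k, v⟩ := kv
  by_cases h1 : k = "id"
  · subst h1; rcases acc with _ | cur <;> rfl
  by_cases h2 : k = "user_id"
  · subst h2; rcases acc with _ | cur <;> rfl
  by_cases h3 : k = "bot_id"
  · subst h3; rcases acc with _ | cur <;> rfl
  by_cases h4 : k = "account_id"
  · subst h4; rcases acc with _ | cur <;> rfl
  by_cases h5 : k = "name"
  · subst h5; rcases acc with _ | cur <;> rfl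
  by_cases h6 : k = "username"
  · subst h6; rcases acc with _ | cur <;> rfl
  by_cases h7 : k = "display_name"
  · subst h7; rcases acc with _ | cur <;> rfl
  by_cases h8 : k = "bot_name"
  · subst h8; rcases acc with _ | cur <;> rfl
  by_cases h9 : k = "email"
  · subst h9; rcases acc with _ | cur <;> rfl
  by_cases h10 : k = "email_address"
  · subst h10; rcases acc with _ | cur <;> rfl
  by_cases h11 : k = "avatar"
  · subst h11; rcases acc with _ | cur <;> rfl
  by_cases h12 : k = "avatar_url"
  · subst h12; rcases acc with _ | cur <;> rfl
  by_cases h13 : k = "profile_image"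
  · subst h13; rcases acc with _ | cur <;> rfl
  by_cases h14 : k = "object"
  · subst h14; rcases acc with _ | cur <;> rfl
  · have hr : bRank.get? k = none := by
      rw [bRank_get? k]
      simp [Ne.symm h1, Ne.symm h2, Ne.symm h3, Ne.symm h4, Ne.symm h5, Ne.symm h6, Ne.symm h7,
        Ne.symm h8, Ne.symm h9, Ne.symm h10, Ne.symm h11, Ne.symm h12, Ne.symm h13, Ne.symm h14]
    have hh : hitAux 0 ["email", "email_address"] (k, v) = none := by
      simp [hitAux, Ne.symm h9, Ne.symm h10]
    rcases acc with _ | cur <;> simp [pstep, hr, hh, mrg]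

set_option maxHeartbeats 1000000 in
theorem pstep_eq_avatar (acc : Option (Int × String)) (kv : String × String) :
    pstep "avatar" acc kv = mrg acc (hitAux 0 ["avatar", "avatar_url", "profile_image"] kv) := by
  obtain ⟨k, v⟩ := kv
  by_cases h1 : k = "id"
  · subst h1; rcases acc with _ | cur <;> rfl
  by_cases h2 : k = "user_id"
  · subst h2; rcases acc with _ | cur <;> rfl
  by_cases h3 : k = "bot_id"
  · subst h3; rcases acc with _ | cur <;> rfl
  by_cases h4 : k = "account_id"
  · subst h4; rcases acc with _ | cur <;> rfl
  by_cases h5 : k = "name"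
  · subst h5; rcases acc with _ | cur <;> rfl
  by_cases h6 : k = "username"
  · subst h6; rcases acc with _ | cur <;> rfl
  by_cases h7 : k = "display_name"
  · subst h7; rcases acc with _ | cur <;> rfl
  by_cases h8 : k = "bot_name"
  · subst h8; rcases acc with _ | cur <;> rfl
  by_cases h9 : k = "email"
  · subst h9; rcases acc with _ | cur <;> rfl
  by_cases h10 : k = "email_address"
  · subst h10; rcases acc with _ | cur <;> rfl
  by_cases h11 : k = "avatar"
  · subst h11; rcases acc with _ | cur <;> rfl
  by_cases h12 : k = "avatar_url"
  · subst h12; rcases acc with _ | cur <;> rfl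
  by_cases h13 : k = "profile_image"
  · subst h13; rcases acc with _ | cur <;> rfl
  by_cases h14 : k = "object"
  · subst h14; rcases acc with _ | cur <;> rfl
  · have hr : bRank.get? k = none := by
      rw [bRank_get? k]
      simp [Ne.symm h1, Ne.symm h2, Ne.symm h3, Ne.symm h4, Ne.symm h5, Ne.symm h6, Ne.symm h7,
        Ne.symm h8, Ne.symm h9, Ne.symm h10, Ne.symm h11, Ne.symm h12, Ne.symm h13, Ne.symm h14]
    have hh : hitAux 0 ["avatar", "avatar_url", "profile_image"] (k, v) = none := by
      simp [hitAux, Ne.symm h11, Ne.symm h12, Ne.symm h13]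
    rcases acc with _ | cur <;> simp [pstep, hr, hh, mrg]

set_option maxHeartbeats 1000000 in
theorem pstep_eq_type (acc : Option (Int × String)) (kv : String × String) :
    pstep "type" acc kv = mrg acc (hitAux 0 ["object"] kv) := by
  obtain ⟨k, v⟩ := kv
  by_cases h1 : k = "id"
  · subst h1; rcases acc with _ | cur <;> rfl
  by_cases h2 : k = "user_id"
  · subst h2; rcases acc with _ | cur <;> rfl
  by_cases h3 : k = "bot_id"
  · subst h3; rcases acc with _ | cur <;> rfl
  by_cases h4 : k = "account_id"
  · subst h4; rcases acc with _ | cur <;> rfl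
  by_cases h5 : k = "name"
  · subst h5; rcases acc with _ | cur <;> rfl
  by_cases h6 : k = "username"
  · subst h6; rcases acc with _ | cur <;> rfl
  by_cases h7 : k = "display_name"
  · subst h7; rcases acc with _ | cur <;> rfl
  by_cases h8 : k = "bot_name"
  · subst h8; rcases acc with _ | cur <;> rfl
  by_cases h9 : k = "email"
  · subst h9; rcases acc with _ | cur <;> rfl
  by_cases h10 : k = "email_address"
  · subst h10; rcases acc with _ | cur <;> rfl
  by_cases h11 : k = "avatar"
  · subst h11; rcases acc with _ | cur <;> rfl
  by_cases h12 : k = "avatar_url"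
  · subst h12; rcases acc with _ | cur <;> rfl
  by_cases h13 : k = "profile_image"
  · subst h13; rcases acc with _ | cur <;> rfl
  by_cases h14 : k = "object"
  · subst h14; rcases acc with _ | cur <;> rfl
  · have hr : bRank.get? k = none := by
      rw [bRank_get? k]
      simp [Ne.symm h1, Ne.symm h2, Ne.symm h3, Ne.symm h4, Ne.symm h5, Ne.symm h6, Ne.symm h7,
        Ne.symm h8, Ne.symm h9, Ne.symm h10, Ne.symm h11, Ne.symm h12, Ne.symm h13, Ne.symm h14]
    have hh : hitAux 0 ["object"] (k, v) = none := by
      simp [hitAux, Ne.symm h14]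
    rcases acc with _ | cur <;> simp [pstep, hr, hh, mrg]

theorem best_get? (data : List (String × String)) (f : String) (ks : List String)
    (hp : ∀ acc kv, pstep f acc kv = mrg acc (hitAux 0 ks kv)) :
    ((PySem.Dict.ofList data).items.foldl bStep PySem.Dict.empty).get? f =
      selAux 0 ks (PySem.Dict.ofList data).items := by
  rw [proj]
  have h0 : (PySem.Dict.empty : PySem.Dict String (Int × String)).get? f = none := rfl
  rw [h0]
  have hfun : pstep f = fun a kv => mrg a (hitAux 0 ks kv) :=
    funext fun a => funext fun kv => hp a kv
  rw [hfun, fold_eq_sel]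

-- conditional insert: the shape both final assemblies share
def ins? (identity : PySem.Dict String String) (f : String) :
    Option String → PySem.Dict String String
  | some v => identity.insert f v
  | none => identity

-- A's per-field scan-and-break equals first-match over the candidate list
theorem aScan_eq_find (d : PySem.Dict String String) (identity : PySem.Dict String String)
    (field : String) (ks : List String) :
    aScan d identity field ks =
      match ks.find? (fun k => d.contains k) with
      | some k => identity.insert field (d.getD k "")
      | none => identity := by
  induction ks with
  | nil => rfl
  | cons k ks ih =>
    by_cases h : d.contains k
    · simp [aScan, List.find?, h]
    · simp only [Bool.not_eq_true] at h
      simp [aScan, List.find?, h, ih]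

theorem find_map (d : PySem.Dict String String) (ks : List String) :
    ∀ n : Int,
      (match ks.find? (fun k => d.contains k) with
       | some k => some (d.getD k "")
       | none => none) = (selAux n ks d.items).map (·.2) := by
  induction ks with
  | nil => intro n; rfl
  | cons k ks ih =>
    intro n
    have hget : d.get? k = lk d.items k := dict_get?_lk d.items k
    by_cases h : d.contains k
    · have hs : (d.get? k).isSome := by rw [← PySem.Dict.contains_eq_isSome_get?]; exact h
      cases hv : d.get? k with
      | none => rw [hv] at hs; exact absurd hs (by simp)
      | some v =>
        have hl : lk d.items k = some v := by rw [← hget]; exact hv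
        simp [List.find?, h, selAux, hl, PySem.Dict.getD_eq_get?_getD, hv]
    · have hn : d.get? k = none := by
        cases hv : d.get? k with
        | none => rfl
        | some v =>
          have hc : d.contains k := by rw [PySem.Dict.contains_eq_isSome_get?, hv]; rfl
          exact absurd hc h
      have hl : lk d.items k = none := by rw [← hget]; exact hn
      have hb : d.contains k = false := by simpa using h
      simp only [List.find?, hb, selAux, hl]
      exact ih (n + 1)

theorem aScan_eq_sel (d : PySem.Dict String String) (identity : PySem.Dict String String)
    (field : String) (ks : List String) :
    aScan d identity field ks = ins? identity field ((selAux 0 ks d.items).map (·.2)) := by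
  rw [aScan_eq_find, ← find_map d ks 0]
  cases hf : ks.find? (fun k => d.contains k) <;> rfl

-- ===== VERDICT (by name: the statement is the Claim_ definition above) =====
set_option maxHeartbeats 1000000 in
theorem extract_identity_info_py_spec : Claim_equal_extract_identity_info_py := by
  intro data _
  unfold Spec_extract_identity_info_py
  simp only [extract_identity_info_py, extract_identity_info_py_alt, List.foldl_cons,
    List.foldl_nil]
  have hobj : ∀ identity : PySem.Dict String String,
      (if (PySem.Dict.ofList data).contains "object" then
        identity.insert "type" ((PySem.Dict.ofList data).getD "object" "") else identity) =
        aScan (PySem.Dict.ofList data) identity "type" ["object"] := by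
    intro identity
    by_cases h : (PySem.Dict.ofList data).contains "object" <;> simp [aScan, h]
  rw [hobj]
  simp only [aScan_eq_sel]
  rw [best_get? data "id" _ pstep_eq_id, best_get? data "name" _ pstep_eq_name,
    best_get? data "email" _ pstep_eq_email, best_get? data "avatar" _ pstep_eq_avatar,
    best_get? data "type" _ pstep_eq_type]
  cases h1 : selAux 0 ["id", "user_id", "bot_id", "account_id"] (PySem.Dict.ofList data).items <;>
  cases h2 : selAux 0 ["name", "username", "display_name", "bot_name"] (PySem.Dict.ofList data).items <;>
  cases h3 : selAux 0 ["email", "email_address"] (PySem.Dict.ofList data).items <;>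
  cases h4 : selAux 0 ["avatar", "avatar_url", "profile_image"] (PySem.Dict.ofList data).items <;>
  cases h5 : selAux 0 ["object"] (PySem.Dict.ofList data).items <;> rfl
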